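-- pv_equiv track=rewrite | github.com/JAMIEL-J/Vizzy-Analytics | backend/app/api/analytics_routes.py | _is_currency_label
-- ===== SOURCE A (Python) =====
-- def _is_currency_label(text: str) -> bool:
--     label = (text or "").lower()
--     keywords = [
--         "revenue", "profit", "income", "earnings", "cost", "expense",
--         "price", "charges", "payment", "budget", "salary", "wage",
--         "fee", "sales", "discount", "amount", "value",
--     ]
--     return any(kw in label for kw in keywords)
-- ===== SOURCE B (Python) =====
-- _KEYWORDS = [
--     "revenue", "profit", "income", "earnings", "cost", "expense",
--     "price", "charges", "payment", "budget", "salary", "wage",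
--     "fee", "sales", "discount", "amount", "value",
-- ]
--
--
-- def _is_currency_label(text: str) -> bool:
--     # Single left-to-right pass over the text: at each position, test whether
--     # any keyword starts there, instead of one full substring scan per keyword.
--     label = (text or "").lower()
--     for i in range(len(label)):
--         if any(label.startswith(kw, i) for kw in _KEYWORDS):
--             return True
--     return False
-- ===== Notes on version B (the rewrite author's own statement) =====
-- stated objective: alternative
-- what changed: A runs one independent full substring scan per keyword (any(kw in label)); B makes a single left-to-right pass over the text, testing at each position whether any keyword starts there (label.startswith(kw, i)).
import Mathlib
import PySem

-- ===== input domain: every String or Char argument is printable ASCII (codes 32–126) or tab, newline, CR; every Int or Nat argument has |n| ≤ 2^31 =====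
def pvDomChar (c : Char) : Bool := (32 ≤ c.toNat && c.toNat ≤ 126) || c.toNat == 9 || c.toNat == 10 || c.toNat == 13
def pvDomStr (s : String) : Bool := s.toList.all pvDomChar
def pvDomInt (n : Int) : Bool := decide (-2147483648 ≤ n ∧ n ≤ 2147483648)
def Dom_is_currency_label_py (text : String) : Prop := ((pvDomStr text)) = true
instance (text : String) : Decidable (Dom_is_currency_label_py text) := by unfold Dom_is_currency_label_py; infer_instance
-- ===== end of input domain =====

-- B replaces one full substring scan per keyword with a single left-to-right pass over the
-- text, testing at each position whether any keyword starts there (objective: alternative).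

-- ===== PORT A =====
-- the keyword list of A (and of B, which reuses the same module constant)
def pvKeywords : List String :=
  ["revenue", "profit", "income", "earnings", "cost", "expense",
   "price", "charges", "payment", "budget", "salary", "wage",
   "fee", "sales", "discount", "amount", "value"]

def is_currency_label_py (text : String) : Bool :=
  -- label = (text or "").lower(); on str, `text or ""` is `text` unless text == ""
  let label := PySem.Str.lower (if text = "" then "" else text)
  -- any(kw in label for kw in keywords)
  pvKeywords.any (fun kw => PySem.Str.isIn kw label)

-- ===== PORT B =====
-- the index loop `for i in range(len(label)): … label.startswith(kw, i) …` transcribed as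
-- structural recursion over the suffixes of the char list (label.startswith(kw, i) is exactly
-- `Chars.startswith (label.drop i) kw.toList`)
def pvScan : List Char → Bool
  | [] => false
  | c :: rest =>
      if pvKeywords.any (fun kw => PySem.Chars.startswith (c :: rest) kw.toList) then true
      else pvScan rest

def is_currency_label_py_alt (text : String) : Bool :=
  let label := PySem.Str.lower (if text = "" then "" else text)
  pvScan label.toList

-- ===== PRECONDITION & SPEC =====
def Spec_is_currency_label_py (text : String) (out : Bool) : Prop := out = is_currency_label_py_alt text
instance (text : String) (out : Bool) : Decidable (Spec_is_currency_label_py text out) := by unfold Spec_is_currency_label_py; infer_instance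

-- ===== CLAIM (what is proved, stated in full; the proofs are below) =====
def Claim_equal_is_currency_label_py : Prop := ∀ (text : String), Dom_is_currency_label_py text → Spec_is_currency_label_py text (is_currency_label_py text)

-- ===== LEMMAS AND PROOFS =====

-- B's suffix scan finds exactly the keywords that occur as an infix of the text
theorem pvScan_iff (s : List Char) :
    pvScan s = true ↔ ∃ kw ∈ pvKeywords, kw.toList <:+: s := by
  induction s with
  | nil =>
      simp only [pvScan]
      constructor
      · intro h; exact absurd h (by simp)
      rintro ⟨kw, hkw, hinf⟩
      have : kw.toList = [] := List.eq_nil_of_infix_nil hinf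
      fin_cases hkw <;> simp_all
  | cons c rest ih =>
      simp only [pvScan]
      split
      · rename_i h
        simp only [List.any_eq_true] at h
        obtain ⟨kw, hkw, hsw⟩ := h
        exact iff_of_true rfl ⟨kw, hkw, ((PySem.Chars.startswith_iff _ _).mp hsw).isInfix⟩
      · rename_i h
        simp only [List.any_eq_true] at h
        push Not at h
        rw [ih]
        constructor
        · rintro ⟨kw, hkw, hinf⟩; exact ⟨kw, hkw, List.infix_cons_iff.mpr (Or.inr hinf)⟩
        · rintro ⟨kw, hkw, hinf⟩
          rcases (List.infix_cons_iff).mp hinf with hpre | hinf'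
          · exact absurd ((PySem.Chars.startswith_iff _ _).mpr hpre) (by simpa using h kw hkw)
          · exact ⟨kw, hkw, hinf'⟩

-- ===== VERDICT (by name: the statement is the Claim_ definition above) =====
theorem is_currency_label_py_spec : Claim_equal_is_currency_label_py := by
  intro text _
  unfold Spec_is_currency_label_py is_currency_label_py is_currency_label_py_alt
  rw [Bool.eq_iff_iff, pvScan_iff]
  simp [PySem.Chars.isIn_iff_infix]
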